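-- pv_equiv track=rewrite | github.com/alvroble/pydnssec-prover | src/pydnssec_prover/ser.py | name_len
-- ===== SOURCE A (Python) =====
-- def name_len(name: str) -> int:
--     """Calculate the wire format length of a DNS name"""
--     canonical_name = name.lower()
--     if canonical_name == ".":
--         return 1
--     else:
--         if canonical_name.endswith('.'):
--             canonical_name = canonical_name[:-1]
--
--         total_len = 1  # Final null byte
--         for label in canonical_name.split('.'):
--             total_len += 1 + len(label.encode('utf-8'))  # Length byte + label
--         return total_len
-- ===== SOURCE B (Python) =====
-- def name_len(name: str) -> int:
--     """Wire-format length by arithmetic on the raw name: no lowercasing, no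
--     slicing, no split -- length bytes and '.' separators telescope to len+2,
--     minus one if a single trailing dot is present."""
--     if name == ".":
--         return 1
--     n = len(name)
--     if name.endswith("."):
--         n -= 1
--     return 2 + n
-- ===== Notes on version B (the rewrite author's own statement) =====
-- stated objective: simpler
-- what changed: B drops the lowercasing, the trailing-dot slice and the split-and-sum loop entirely: it works arithmetically on the raw name, returning 2 + len(name) (minus one for a trailing dot), since lowercasing preserves length and each '.' separator byte stands in for the next label's length byte, so the per-label sum telescopes.
import Mathlib
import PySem

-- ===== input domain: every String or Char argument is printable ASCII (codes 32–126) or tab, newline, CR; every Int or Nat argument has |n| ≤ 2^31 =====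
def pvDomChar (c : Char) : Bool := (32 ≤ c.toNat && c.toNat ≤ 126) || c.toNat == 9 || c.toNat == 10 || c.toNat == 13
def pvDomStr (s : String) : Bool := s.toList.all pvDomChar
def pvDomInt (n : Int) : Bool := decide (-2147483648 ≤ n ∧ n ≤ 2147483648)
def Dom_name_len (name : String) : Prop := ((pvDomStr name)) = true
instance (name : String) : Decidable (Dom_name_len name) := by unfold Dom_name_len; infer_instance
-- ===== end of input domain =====

-- B drops A's lowercasing, slicing and split-and-sum loop: it returns 2 + len(name),
-- minus one for a trailing dot, since separators and length bytes telescope (objective: simpler).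

-- ===== PORT A =====
-- len(label.encode('utf-8')) is ported as label.length: exact on the ASCII domain (one byte per char).
def name_len (name : String) : Int :=
  let canonical := PySem.Chars.lower name.toList
  if canonical = ['.'] then 1
  else
    let canonical :=
      if PySem.Chars.endswith canonical ['.'] then PySem.List.slice canonical none (some (-1))
      else canonical
    (PySem.Chars.splitOn canonical ['.']).foldl
      (fun acc label => acc + (1 + (label.length : Int))) 1

-- ===== PORT B =====
-- len(name) is ported as name.toList.length (exact: Python len counts code points).
def name_len_alt (name : String) : Int :=
  if name.toList = ['.'] then 1
  else
    let n : Int := (name.toList.length : Int)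
    let n := if PySem.Chars.endswith name.toList ['.'] then n - 1 else n
    2 + n

-- ===== PRECONDITION & SPEC =====
def Spec_name_len (name : String) (out : Int) : Prop := out = name_len_alt name
instance (name : String) (out : Int) : Decidable (Spec_name_len name out) := by unfold Spec_name_len; infer_instance

-- ===== CLAIM (what is proved, stated in full; the proofs are below) =====
def Claim_equal_name_len : Prop := ∀ (name : String), Dom_name_len name → Spec_name_len name (name_len name)

-- ===== LEMMAS AND PROOFS =====

-- lowering a character yields '.' exactly when the character is '.'
lemma lowerChar_eq_dot (c : Char) : PySem.Chars.lowerChar c = '.' ↔ c = '.' := by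
  constructor
  · intro h
    have hd : PySem.Chars.lowerChar c = if PySem.Chars.isupper c then Char.ofNat (c.toNat + 32) else c := rfl
    rw [hd] at h
    by_cases hu : PySem.Chars.isupper c = true
    · exfalso
      have hb : 65 ≤ c.toNat ∧ c.toNat ≤ 90 := by
        have hb' : (('A' ≤ c) && (c ≤ 'Z')) = true := hu
        simp only [Bool.and_eq_true, decide_eq_true_eq, Char.le_def] at hb'
        exact hb'
      rw [if_pos hu] at h
      have h46 := congrArg Char.toNat h
      rw [Char.toNat_ofNat, if_pos (Or.inl (by omega : c.toNat + 32 < 55296))] at h46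
      have hdot : ('.' : Char).toNat = 46 := rfl
      omega
    · rw [if_neg hu] at h; exact h
  · intro h; subst h; decide

lemma lower_eq_singleton_dot (s : List Char) :
    PySem.Chars.lower s = ['.'] ↔ s = ['.'] := by
  have hm : PySem.Chars.lower s = s.map PySem.Chars.lowerChar := rfl
  rw [hm]
  constructor
  · intro h
    rcases List.map_eq_singleton_iff.mp h with ⟨b, hb, hfb⟩
    rw [hb, (lowerChar_eq_dot b).mp hfb]
  · intro h; subst h
    simp [List.map, (lowerChar_eq_dot '.').mpr rfl]

lemma lower_length (s : List Char) : (PySem.Chars.lower s).length = s.length := by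
  have hm : PySem.Chars.lower s = s.map PySem.Chars.lowerChar := rfl
  rw [hm]; exact List.length_map ..

-- a singleton ['.'] is a suffix of l ++ [x] exactly when x is '.'
lemma suffix_dot (l : List Char) (x : Char) : (['.'] <:+ l ++ [x]) ↔ x = '.' := by
  constructor
  · rintro ⟨t, ht⟩
    have h := congrArg List.getLast? ht
    simp at h
    exact h.symm
  · rintro rfl; exact ⟨l, rfl⟩

-- ends-with-'.' is invariant under lowering
lemma endswith_dot_lower (s : List Char) :
    PySem.Chars.endswith (PySem.Chars.lower s) ['.'] = PySem.Chars.endswith s ['.'] := by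
  have he : ∀ t : List Char, PySem.Chars.endswith t ['.'] = List.isSuffixOf ['.'] t := fun _ => rfl
  have hl : PySem.Chars.lower s = s.map PySem.Chars.lowerChar := rfl
  rw [he, he, hl]
  induction s using List.reverseRecOn with
  | nil => simp
  | append_singleton xs x _ =>
    simp only [List.map_append, List.map]
    rw [Bool.eq_iff_iff, List.isSuffixOf_iff_suffix, List.isSuffixOf_iff_suffix,
        suffix_dot, suffix_dot]
    exact lowerChar_eq_dot x

lemma endswith_dot_ne_nil (s : List Char) (h : PySem.Chars.endswith s ['.'] = true) : s ≠ [] := by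
  intro hn; subst hn
  simp [PySem.Chars.endswith, List.isSuffixOf] at h

-- splitOn.go sum telescopes: Σ (1 + len label) = (sum over acc) + 1 + |cur| + |l|
lemma go_sum (fuel : Nat) : ∀ (l cur : List Char) (acc : List (List Char)),
    ((PySem.Chars.splitOn.go ['.'] fuel l cur acc).map
        (fun lbl => 1 + (lbl.length : Int))).sum
      = ((acc.reverse.map (fun lbl => 1 + (lbl.length : Int))).sum)
        + 1 + (cur.length : Int) + (l.length : Int) := by
  induction fuel with
  | zero =>
    intro l cur acc
    simp [PySem.Chars.splitOn.go]
    ring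
  | succ fuel ih =>
    intro l cur acc
    cases l with
    | nil =>
      simp [PySem.Chars.splitOn.go]
      ring
    | cons c rest =>
      rw [PySem.Chars.splitOn.go]
      by_cases h : List.isPrefixOf ['.'] (c :: rest) = true
      · rw [if_pos h, ih]
        simp
        ring
      · rw [if_neg h, ih]
        simp
        ring

lemma foldl_sum (L : List (List Char)) (init : Int) :
    L.foldl (fun acc label => acc + (1 + (label.length : Int))) init
      = init + (L.map (fun lbl => 1 + (lbl.length : Int))).sum := by
  induction L generalizing init with
  | nil => simp
  | cons x xs ih => simp [List.foldl_cons, ih]; ring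

lemma split_total (s : List Char) :
    (PySem.Chars.splitOn s ['.']).foldl
        (fun acc label => acc + (1 + (label.length : Int))) 1
      = 2 + (s.length : Int) := by
  rw [foldl_sum, PySem.Chars.splitOn, go_sum]
  simp; ring

-- ===== VERDICT (by name: the statement is the Claim_ definition above) =====
theorem name_len_spec : Claim_equal_name_len := by
  intro name _
  unfold Spec_name_len name_len name_len_alt
  simp only []
  by_cases h : PySem.Chars.lower name.toList = ['.']
  · rw [if_pos h, if_pos ((lower_eq_singleton_dot _).mp h)]
  · rw [if_neg h, if_neg (fun hs => h ((lower_eq_singleton_dot _).mpr hs))]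
    by_cases he : PySem.Chars.endswith name.toList ['.'] = true
    · have he' : PySem.Chars.endswith (PySem.Chars.lower name.toList) ['.'] = true := by
        rw [endswith_dot_lower]; exact he
      rw [if_pos he', if_pos he, split_total]
      rw [PySem.List.slice_to_neg_one, List.length_dropLast, lower_length]
      have hne := endswith_dot_ne_nil _ he
      have : 1 ≤ name.toList.length := List.length_pos_iff.mpr hne
      push_cast [Nat.cast_sub this]
      ring
    · have he' : PySem.Chars.endswith (PySem.Chars.lower name.toList) ['.'] ≠ true := by
        rw [endswith_dot_lower]; exact he
      rw [if_neg he', if_neg he, split_total, lower_length]
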